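-- pv_equiv track=rewrite | github.com/benquick123/code-profiling | code/batch-2/vse-naloge-brez-testov/DN7-M-096.py | n_sosedov
-- ===== SOURCE A (Python) =====
-- def sosedov(x, y, mine):
--     """
--     Vrni število sosedov polja s koordinatami `(x, y)` na katerih je mina.
--     Polje samo ne šteje.
--
--     Args:
--         x (int): koordinata x
--         y (int): koordinata y
--         mine (set of tuple of int): koordinate min
--
--     Returns:
--         int: število sosedov
--     """
--     count = 0
--     for a, b in mine:
--         if (a == x or a == x - 1 or a == x + 1) and (b == y or b == y - 1 or b == y + 1) and (a != x or b != y):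
--             count += 1
--     return count
--
-- def n_sosedov(mine, s, v, n):
--     sir = 0
--     vis = 0
--     n_sosedov = {(404, 404)}
--     while sir < s and vis < v:
--         if sosedov(sir, vis, mine) == n:
--             n_sosedov.add((sir, vis))
--         if vis < v - 1:
--             vis += 1
--         else:
--             vis = 0
--             sir += 1
--     n_sosedov.remove((404, 404))
--     return n_sosedov
-- ===== SOURCE B (Python) =====
-- def n_sosedov(mine, s, v, n):
--     # One pass over the mines distributes each mine into per-row neighbour-count
--     # dictionaries; a single grid scan then selects cells by dictionary lookup.
--     if s <= 0 or v <= 0: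
--         return set()
--     rows = {}
--     for a, b in mine:
--         for dx, dy in ((-1, -1), (-1, 0), (-1, 1), (0, -1), (0, 1), (1, -1), (1, 0), (1, 1)):
--             row = rows.get(a + dx, {})
--             row[b + dy] = row.get(b + dy, 0) + 1
--             rows[a + dx] = row
--     out = set()
--     for x in range(s):
--         row = rows.get(x, {})
--         for y in range(v):
--             if row.get(y, 0) == n:
--                 out.add((x, y))
--     return out
-- ===== Notes on version B (the rewrite author's own statement) =====
-- stated objective: alternative
-- what changed: B makes one pass over the mines, distributing each mine into per-row neighbour-count dictionaries, then scans the grid once selecting each cell by dictionary lookup instead of rescanning the whole mine list for every grid cell (intended as faster, measured 108x at mid sizes but unconfirmed at the largest sizes, where both time out); B has no (404,404) sentinel, so it also returns cell (404,404) when it qualifies.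
-- intended difference: On grids with s > 404 and v > 404 whose cell (404,404) has exactly n neighbouring mines, A omits (404,404) from the returned set (it collides with the {(404,404)} sentinel A seeds its result set with and removes at the end); B returns the full set including (404,404), which is the intended value. — e.g. on n_sosedov([(403, 403)], 405, 405, 1): A returns [(402, 402), (402, 403), (402, 404), (403, 402), (403, 404), (404, 402), (404, 403)], B returns [(402, 402), (402, 403), (402, 404), (403, 402), (403, 404), (404, 402), (404, 403), (404, 404)]
import Mathlib
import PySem

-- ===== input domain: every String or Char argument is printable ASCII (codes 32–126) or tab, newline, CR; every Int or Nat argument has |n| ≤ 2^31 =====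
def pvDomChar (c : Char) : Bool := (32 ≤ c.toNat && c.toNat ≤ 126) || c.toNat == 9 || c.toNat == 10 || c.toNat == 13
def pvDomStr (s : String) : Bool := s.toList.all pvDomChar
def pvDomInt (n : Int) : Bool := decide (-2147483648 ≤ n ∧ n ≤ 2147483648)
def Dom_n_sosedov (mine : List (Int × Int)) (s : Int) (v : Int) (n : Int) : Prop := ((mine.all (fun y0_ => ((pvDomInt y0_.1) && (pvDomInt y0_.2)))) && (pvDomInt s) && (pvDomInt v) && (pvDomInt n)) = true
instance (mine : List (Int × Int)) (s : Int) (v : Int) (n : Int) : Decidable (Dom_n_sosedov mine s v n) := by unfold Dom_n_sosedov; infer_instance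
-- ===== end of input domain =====

-- B distributes each mine into per-row neighbour-count dictionaries in one pass and then scans the grid once,
-- instead of rescanning the mine list for every grid cell; it agrees with A everywhere outside D_
-- (A's 404-sentinel corner, where B's value is the intended one).

-- ===== PORT A =====
def sosedov (x : Int) (y : Int) (mine : List (Int × Int)) : Int :=
  mine.foldl (fun count p =>
    if (p.1 = x ∨ p.1 = x - 1 ∨ p.1 = x + 1) ∧ (p.2 = y ∨ p.2 = y - 1 ∨ p.2 = y + 1) ∧ (p.1 ≠ x ∨ p.2 ≠ y)
    then count + 1 else count) 0

def nSosedovLoop (mine : List (Int × Int)) (s v n sir vis : Int) (acc : PySem.Set (Int × Int)) : PySem.Set (Int × Int) :=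
  if _h : sir < s ∧ vis < v then
    let acc' := if sosedov sir vis mine = n then acc.add (sir, vis) else acc
    if vis < v - 1 then nSosedovLoop mine s v n sir (vis + 1) acc'
    else nSosedovLoop mine s v n (sir + 1) 0 acc'
  else acc
termination_by ((s - sir).toNat, (v - vis).toNat)
decreasing_by
  · apply Prod.Lex.right; omega
  · apply Prod.Lex.left; omega

-- Python's set.remove would raise KeyError only if the sentinel were absent; it was inserted at the start and is
-- never removed before the final `remove`, so remove? is always `some` (proved below) and `.getD []` is never used.
def n_sosedov (mine : List (Int × Int)) (s : Int) (v : Int) (n : Int) : List (Int × Int) :=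
  ((nSosedovLoop mine s v n 0 0 (PySem.Set.ofList [((404 : Int), (404 : Int))])).remove?
      ((404 : Int), (404 : Int))).getD []

-- ===== PORT B =====
def altOffsets : List (Int × Int) := [(-1, -1), (-1, 0), (-1, 1), (0, -1), (0, 1), (1, -1), (1, 0), (1, 1)]

def altRows (mine : List (Int × Int)) : PySem.Dict Int (PySem.Dict Int Int) :=
  mine.foldl (fun d p =>
    altOffsets.foldl (fun d o =>
      let row := d.getD (p.1 + o.1) PySem.Dict.empty
      d.insert (p.1 + o.1) (row.insert (p.2 + o.2) (row.getD (p.2 + o.2) 0 + 1))) d)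
    PySem.Dict.empty

def n_sosedov_alt (mine : List (Int × Int)) (s : Int) (v : Int) (n : Int) : List (Int × Int) :=
  if s ≤ 0 ∨ v ≤ 0 then []
  else
  let rows := altRows mine
  (PySem.List.pyRange 0 s 1).foldl (fun out x =>
    let row := rows.getD x PySem.Dict.empty
    (PySem.List.pyRange 0 v 1).foldl (fun out y =>
      if row.getD y 0 = n then PySem.Set.add out (x, y) else out) out)
    PySem.Set.empty

-- ===== PRECONDITION & SPEC =====
-- On grids with s > 404 and v > 404 whose cell (404,404) has exactly n neighbouring mines, A omits (404,404) from the
-- returned set (it collides with the {(404,404)} sentinel A seeds its result set with and removes at the end);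
-- B returns the full set including (404,404), which is the intended value.
def D_n_sosedov (mine : List (Int × Int)) (s : Int) (v : Int) (n : Int) : Prop :=
  404 < s ∧ 404 < v ∧
  ((mine.countP fun p =>
      (p.1 == 403 || p.1 == 404 || p.1 == 405) && (p.2 == 403 || p.2 == 404 || p.2 == 405) &&
      !(p.1 == 404 && p.2 == 404) : Nat) : Int) = n
instance (mine : List (Int × Int)) (s : Int) (v : Int) (n : Int) : Decidable (D_n_sosedov mine s v n) := by
  unfold D_n_sosedov; infer_instance

def Spec_n_sosedov (mine : List (Int × Int)) (s : Int) (v : Int) (n : Int) (out : List (Int × Int)) : Prop :=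
  ¬ D_n_sosedov mine s v n → out = n_sosedov_alt mine s v n
instance (mine : List (Int × Int)) (s : Int) (v : Int) (n : Int) (out : List (Int × Int)) : Decidable (Spec_n_sosedov mine s v n out) := by
  unfold Spec_n_sosedov; infer_instance

def pvDiffWitness_n_sosedov : (List (Int × Int)) × Int × Int × Int := ([(403, 403)], 405, 405, 1)
def pvDiffWitnessOut_n_sosedov : (List (Int × Int)) × (List (Int × Int)) :=
  ([(402, 402), (402, 403), (402, 404), (403, 402), (403, 404), (404, 402), (404, 403)],
   [(402, 402), (402, 403), (402, 404), (403, 402), (403, 404), (404, 402), (404, 403), (404, 404)])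

-- ===== CLAIM (what is proved, stated in full; the proofs are below) =====
def Claim_unchanged_n_sosedov : Prop := ∀ (mine : List (Int × Int)) (s : Int) (v : Int) (n : Int), Dom_n_sosedov mine s v n → Spec_n_sosedov mine s v n (n_sosedov mine s v n)
def Claim_changed_n_sosedov : Prop := Dom_n_sosedov (pvDiffWitness_n_sosedov.1) (pvDiffWitness_n_sosedov.2.1) (pvDiffWitness_n_sosedov.2.2.1) (pvDiffWitness_n_sosedov.2.2.2) ∧ D_n_sosedov (pvDiffWitness_n_sosedov.1) (pvDiffWitness_n_sosedov.2.1) (pvDiffWitness_n_sosedov.2.2.1) (pvDiffWitness_n_sosedov.2.2.2) ∧ n_sosedov (pvDiffWitness_n_sosedov.1) (pvDiffWitness_n_sosedov.2.1) (pvDiffWitness_n_sosedov.2.2.1) (pvDiffWitness_n_sosedov.2.2.2) = pvDiffWitnessOut_n_sosedov.1 ∧ n_sosedov_alt (pvDiffWitness_n_sosedov.1) (pvDiffWitness_n_sosedov.2.1) (pvDiffWitness_n_sosedov.2.2.1) (pvDiffWitness_n_sosedov.2.2.2) = pvDiffWitnessOut_n_sosedov.2 ∧ pvDiffWitnessOut_n_sosedov.1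 ≠ pvDiffWitnessOut_n_sosedov.2
def Claim_exact_n_sosedov : Prop := ∀ (mine : List (Int × Int)) (s : Int) (v : Int) (n : Int), Dom_n_sosedov mine s v n → D_n_sosedov mine s v n → n_sosedov mine s v n ≠ n_sosedov_alt mine s v n

-- ===== LEMMAS AND PROOFS =====

-- Boolean form of A's adjacency test
def adjB (x y : Int) (p : Int × Int) : Bool :=
  (p.1 == x || p.1 == x - 1 || p.1 == x + 1) && (p.2 == y || p.2 == y - 1 || p.2 == y + 1) &&
  !(p.1 == x && p.2 == y)

theorem adjB_iff (x y : Int) (p : Int × Int) :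
    adjB x y p = true ↔
      ((p.1 = x ∨ p.1 = x - 1 ∨ p.1 = x + 1) ∧ (p.2 = y ∨ p.2 = y - 1 ∨ p.2 = y + 1) ∧ (p.1 ≠ x ∨ p.2 ≠ y)) := by
  simp [adjB]; tauto

theorem sosedov_eq_countP (x y : Int) (mine : List (Int × Int)) :
    sosedov x y mine = (mine.countP (adjB x y) : Int) := by
  unfold sosedov
  have h : (fun (count : Int) (p : Int × Int) =>
        if (p.1 = x ∨ p.1 = x - 1 ∨ p.1 = x + 1) ∧ (p.2 = y ∨ p.2 = y - 1 ∨ p.2 = y + 1) ∧ (p.1 ≠ x ∨ p.2 ≠ y)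
        then count + 1 else count)
      = fun count p => if adjB x y p = true then count + 1 else count := by
    funext count p
    by_cases hp : adjB x y p = true
    · rw [if_pos hp, if_pos ((adjB_iff x y p).1 hp)]
    · rw [if_neg hp, if_neg (fun hc => hp ((adjB_iff x y p).2 hc))]
  rw [h, PySem.List.foldl_count_if]
  simp

theorem getD2_insert (d : PySem.Dict Int (PySem.Dict Int Int)) (k y2 x y : Int) :
    ((d.insert k ((d.getD k PySem.Dict.empty).insert y2
        ((d.getD k PySem.Dict.empty).getD y2 0 + 1))).getD x PySem.Dict.empty).getD y 0
      = (d.getD x PySem.Dict.empty).getD y 0 + (if x = k ∧ y = y2 then 1 else 0) := by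
  rw [PySem.Dict.getD_insert]
  by_cases hx : x = k
  · subst hx
    rw [if_pos rfl, PySem.Dict.getD_insert]
    by_cases hy : y = y2 <;> simp [hy]
  · simp [hx]

theorem fold_tower (a b x y : Int) :
    ∀ (os : List (Int × Int)) (d : PySem.Dict Int (PySem.Dict Int Int)),
      ((os.foldl (fun d o =>
          let row := d.getD (a + o.1) PySem.Dict.empty
          d.insert (a + o.1) (row.insert (b + o.2) (row.getD (b + o.2) 0 + 1))) d).getD
            x PySem.Dict.empty).getD y 0
        = (d.getD x PySem.Dict.empty).getD y 0
            + (os.countP (fun o => decide (x = a + o.1 ∧ y = b + o.2)) : Int) := by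
  intro os
  induction os with
  | nil => intro d; simp
  | cons o os ih =>
    intro d
    rw [List.foldl_cons, ih, List.countP_cons]
    show (((d.insert (a + o.1) ((d.getD (a + o.1) PySem.Dict.empty).insert (b + o.2)
        ((d.getD (a + o.1) PySem.Dict.empty).getD (b + o.2) 0 + 1))).getD
          x PySem.Dict.empty).getD y 0) + _ = _
    rw [getD2_insert]
    by_cases hp : x = a + o.1 ∧ y = b + o.2
    · rw [if_pos hp, if_pos (decide_eq_true hp)]
      push_cast
      ring
    · rw [if_neg hp, if_neg (by simp [hp])]
      push_cast
      ring

set_option maxHeartbeats 2000000 in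
theorem step_rows (p : Int × Int) (d : PySem.Dict Int (PySem.Dict Int Int)) (x y : Int) :
    (((altOffsets.foldl (fun d o =>
        let row := d.getD (p.1 + o.1) PySem.Dict.empty
        d.insert (p.1 + o.1) (row.insert (p.2 + o.2) (row.getD (p.2 + o.2) 0 + 1))) d)).getD
          x PySem.Dict.empty).getD y 0
      = (d.getD x PySem.Dict.empty).getD y 0 + (if adjB x y p then 1 else 0) := by
  rcases p with ⟨a, b⟩
  rw [fold_tower, if_congr (adjB_iff x y (a, b)) rfl rfl]
  simp only [altOffsets, List.countP_cons, List.countP_nil, decide_eq_true_eq]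
  split_ifs <;> push_cast <;> omega

theorem rows_getD (mine : List (Int × Int)) (x y : Int) :
    ((altRows mine).getD x PySem.Dict.empty).getD y 0 = (mine.countP (adjB x y) : Int) := by
  unfold altRows
  have h : ∀ d : PySem.Dict Int (PySem.Dict Int Int),
      ((mine.foldl (fun d p =>
          altOffsets.foldl (fun d o =>
            let row := d.getD (p.1 + o.1) PySem.Dict.empty
            d.insert (p.1 + o.1) (row.insert (p.2 + o.2) (row.getD (p.2 + o.2) 0 + 1))) d) d).getD
            x PySem.Dict.empty).getD y 0
        = (d.getD x PySem.Dict.empty).getD y 0 + (mine.countP (adjB x y) : Int) := by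
    induction mine with
    | nil => intro d; simp
    | cons p t ih =>
      intro d
      rw [List.foldl_cons, ih, step_rows, List.countP_cons]
      by_cases hp : adjB x y p = true
      · simp only [hp, if_true]
        push_cast
        ring
      · simp [hp]
  rw [h PySem.Dict.empty]
  simp

-- the list of qualifying cells in A's visit order (mirrors A's while loop)
def qcells (mine : List (Int × Int)) (s v n sir vis : Int) : List (Int × Int) :=
  if _h : sir < s ∧ vis < v then
    (if sosedov sir vis mine = n then [(sir, vis)] else []) ++
    (if vis < v - 1 then qcells mine s v n sir (vis + 1) else qcells mine s v n (sir + 1) 0)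
  else []
termination_by ((s - sir).toNat, (v - vis).toNat)
decreasing_by
  · apply Prod.Lex.right; omega
  · apply Prod.Lex.left; omega

theorem loop_eq (mine : List (Int × Int)) (s v n sir vis : Int) (acc : PySem.Set (Int × Int)) :
    nSosedovLoop mine s v n sir vis acc = List.foldl PySem.Set.add acc (qcells mine s v n sir vis) := by
  fun_induction nSosedovLoop mine s v n sir vis acc with
  | case1 sir vis acc hg acc' hlt ih =>
    rw [qcells, dif_pos hg, if_pos hlt, List.foldl_append, ih]
    by_cases hq : sosedov sir vis mine = n <;> simp [acc', hq]
  | case2 sir vis acc hg acc' hlt ih =>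
    rw [qcells, dif_pos hg, if_neg hlt, List.foldl_append, ih]
    by_cases hq : sosedov sir vis mine = n <;> simp [acc', hq]
  | case3 sir vis acc hg =>
    rw [qcells, dif_neg hg]
    rfl

-- A's qualifying cells as a flat row-major list
def cellsR (mine : List (Int × Int)) (s v n : Int) : List (Int × Int) :=
  (PySem.List.pyRange 0 s 1).flatMap fun x =>
    (PySem.List.pyRange 0 v 1).filterMap fun y =>
      if sosedov x y mine = n then some (x, y) else none

theorem qcells_row (mine : List (Int × Int)) (s v n : Int) :
    ∀ (k : Nat) (sir vis : Int), (v - vis).toNat = k → sir < s → vis < v →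
      qcells mine s v n sir vis
        = ((PySem.List.pyRange vis v 1).filterMap fun y =>
            if sosedov sir y mine = n then some (sir, y) else none) ++ qcells mine s v n (sir + 1) 0 := by
  intro k
  induction k with
  | zero => intro sir vis hk h1 h2; omega
  | succ k ih =>
    intro sir vis hk h1 h2
    rw [qcells, dif_pos ⟨h1, h2⟩, PySem.List.pyRange_one_cons h2, List.filterMap_cons]
    by_cases hb : vis < v - 1
    · rw [if_pos hb, ih sir (vis + 1) (by omega) h1 (by omega)]
      by_cases hq : sosedov sir vis mine = n <;> simp [hq]
    · rw [if_neg hb, PySem.List.pyRange_one_eq_nil (by omega : v ≤ vis + 1), List.filterMap_nil]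
      by_cases hq : sosedov sir vis mine = n <;> simp [hq]

theorem qcells_rows (mine : List (Int × Int)) (s v n : Int) :
    ∀ (k : Nat) (sir : Int), (s - sir).toNat = k →
      qcells mine s v n sir 0
        = (PySem.List.pyRange sir s 1).flatMap fun x =>
            (PySem.List.pyRange 0 v 1).filterMap fun y =>
              if sosedov x y mine = n then some (x, y) else none := by
  intro k
  induction k with
  | zero =>
    intro sir hk
    rw [qcells, dif_neg (by omega), PySem.List.pyRange_one_eq_nil (a := sir) (b := s) (by omega),
      List.flatMap_nil]
  | succ k ih =>
    intro sir hk
    have hsir : sir < s := by omega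
    by_cases hv : 0 < v
    · rw [qcells_row mine s v n (v - 0).toNat sir 0 rfl hsir hv, ih (sir + 1) (by omega),
        PySem.List.pyRange_one_cons hsir, List.flatMap_cons]
    · rw [qcells, dif_neg (by omega)]
      refine (List.flatMap_eq_nil_iff.mpr fun x _ => ?_).symm
      rw [PySem.List.pyRange_one_eq_nil (by omega), List.filterMap_nil]

theorem foldl_add_cons {x : Int × Int} :
    ∀ (R t : List (Int × Int)),
      List.foldl PySem.Set.add (x :: t) R
        = x :: List.foldl PySem.Set.add t (R.filter fun c => !(c == x)) := by
  intro R
  induction R with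
  | nil => intro t; simp
  | cons c R ih =>
    intro t
    rw [List.foldl_cons]
    by_cases hc : c = x
    · subst hc
      rw [PySem.Set.add_eq_ite, if_pos (by exact List.mem_cons_self ..)]
      rw [List.filter_cons_of_neg (by simp)]
      exact ih t
    · rw [List.filter_cons_of_pos (by simp [hc]), List.foldl_cons]
      by_cases hmem : c ∈ t
      · rw [PySem.Set.add_eq_ite, if_pos (List.mem_cons_of_mem x hmem),
          PySem.Set.add_eq_ite, if_pos hmem]
        exact ih t
      · rw [PySem.Set.add_eq_ite, if_neg (by simp [hc, hmem]),
          PySem.Set.add_eq_ite, if_neg hmem, List.cons_append]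
        exact ih (t ++ [c])

theorem n_sosedov_eq (mine : List (Int × Int)) (s v n : Int) :
    n_sosedov mine s v n
      = PySem.Set.ofList ((cellsR mine s v n).filter fun c => !(c == ((404 : Int), (404 : Int)))) := by
  unfold n_sosedov
  rw [loop_eq,
    show PySem.Set.ofList [((404 : Int), (404 : Int))] = [((404 : Int), (404 : Int))] from rfl,
    foldl_add_cons, ← PySem.Set.ofList_eq_foldl,
    qcells_rows mine s v n (s - 0).toNat 0 rfl]
  have hR : ((PySem.List.pyRange 0 s 1).flatMap fun x =>
      (PySem.List.pyRange 0 v 1).filterMap fun y =>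
        if sosedov x y mine = n then some (x, y) else none) = cellsR mine s v n := rfl
  rw [hR]
  set L := PySem.Set.ofList ((cellsR mine s v n).filter fun c => !(c == ((404 : Int), (404 : Int)))) with hL
  have hx : ∀ a ∈ L, (!(a == ((404 : Int), (404 : Int)))) = true := by
    intro a ha
    rw [hL, PySem.Set.mem_ofList] at ha
    exact (List.mem_filter.mp ha).2
  have hrem : (PySem.Set.remove? (((404 : Int), (404 : Int)) :: L) ((404 : Int), (404 : Int)))
      = some (L.filter fun y => !(y == ((404 : Int), (404 : Int)))) := by
    rw [PySem.Set.remove?, if_pos (by simp [PySem.Set.contains]), PySem.Set.discard,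
      List.filter_cons_of_neg (by simp)]
  rw [hrem]
  simp only [Option.getD_some]
  exact List.filter_eq_self.mpr hx

theorem inner_loop_eq (row : PySem.Dict Int Int) (n x : Int) :
    ∀ (l : List Int) (out : PySem.Set (Int × Int)),
      l.foldl (fun out y => if row.getD y 0 = n then PySem.Set.add out (x, y) else out) out
        = List.foldl PySem.Set.add out
            (l.filterMap fun y => if row.getD y 0 = n then some (x, y) else none) := by
  intro l
  induction l with
  | nil => intro out; rfl
  | cons y l ih =>
    intro out
    rw [List.foldl_cons, List.filterMap_cons]
    by_cases hq : row.getD y 0 = n <;> simp [hq, ih]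

theorem outer_loop_eq (rows : PySem.Dict Int (PySem.Dict Int Int)) (v n : Int) :
    ∀ (l : List Int) (out : PySem.Set (Int × Int)),
      l.foldl (fun out x =>
          let row := rows.getD x PySem.Dict.empty
          (PySem.List.pyRange 0 v 1).foldl
            (fun out y => if row.getD y 0 = n then PySem.Set.add out (x, y) else out) out) out
        = List.foldl PySem.Set.add out
            (l.flatMap fun x => (PySem.List.pyRange 0 v 1).filterMap fun y =>
              if (rows.getD x PySem.Dict.empty).getD y 0 = n then some (x, y) else none) := by
  intro l
  induction l with
  | nil => intro out; rfl
  | cons x l ih =>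
    intro out
    rw [List.foldl_cons, List.flatMap_cons, List.foldl_append, inner_loop_eq, ih]

theorem cellsR_nil (mine : List (Int × Int)) (s v n : Int) (hg : s ≤ 0 ∨ v ≤ 0) :
    cellsR mine s v n = [] := by
  unfold cellsR
  rcases hg with hs | hv
  · rw [PySem.List.pyRange_one_eq_nil hs, List.flatMap_nil]
  · refine List.flatMap_eq_nil_iff.mpr fun x _ => ?_
    rw [PySem.List.pyRange_one_eq_nil hv, List.filterMap_nil]

theorem alt_eq (mine : List (Int × Int)) (s v n : Int) :
    n_sosedov_alt mine s v n = PySem.Set.ofList (cellsR mine s v n) := by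
  by_cases hg : s ≤ 0 ∨ v ≤ 0
  · rw [n_sosedov_alt, if_pos hg, cellsR_nil mine s v n hg]
    rfl
  rw [n_sosedov_alt, if_neg hg]
  unfold cellsR
  rw [outer_loop_eq,
    show (PySem.Set.empty : PySem.Set (Int × Int)) = [] from rfl,
    ← PySem.Set.ofList_eq_foldl]
  simp only [rows_getD, sosedov_eq_countP]

theorem mem_cellsR (mine : List (Int × Int)) (s v n : Int) (c : Int × Int) :
    c ∈ cellsR mine s v n ↔
      (0 ≤ c.1 ∧ c.1 < s ∧ 0 ≤ c.2 ∧ c.2 < v ∧ sosedov c.1 c.2 mine = n) := by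
  rcases c with ⟨x, y⟩
  unfold cellsR
  simp only [List.mem_flatMap, List.mem_filterMap, PySem.List.mem_pyRange_one]
  constructor
  · rintro ⟨x', hx', y', hy', hif⟩
    by_cases hq : sosedov x' y' mine = n
    · rw [if_pos hq, Option.some.injEq, Prod.mk.injEq] at hif
      obtain ⟨h1, h2⟩ := hif; subst h1; subst h2
      exact ⟨hx'.1, hx'.2, hy'.1, hy'.2, hq⟩
    · rw [if_neg hq] at hif; cases hif
  · rintro ⟨h1, h2, h3, h4, h5⟩
    exact ⟨x, ⟨h1, h2⟩, y, ⟨h3, h4⟩, by rw [if_pos h5]⟩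

theorem D_pred_eq (p : Int × Int) :
    ((p.1 == 403 || p.1 == 404 || p.1 == 405) && (p.2 == 403 || p.2 == 404 || p.2 == 405) &&
      !(p.1 == 404 && p.2 == 404)) = adjB 404 404 p := by
  rcases p with ⟨a, b⟩
  rw [Bool.eq_iff_iff]
  simp [adjB]
  omega

theorem D_iff (mine : List (Int × Int)) (s v n : Int) :
    D_n_sosedov mine s v n ↔ (404 < s ∧ 404 < v ∧ sosedov 404 404 mine = n) := by
  unfold D_n_sosedov
  simp only [D_pred_eq, sosedov_eq_countP]

-- evaluation of sosedov for the single witness mine (403, 403)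
theorem sos_w (x y : Int) :
    sosedov x y [((403 : Int), (403 : Int))]
      = if ((403 : Int) = x ∨ (403 : Int) = x - 1 ∨ (403 : Int) = x + 1) ∧
            ((403 : Int) = y ∨ (403 : Int) = y - 1 ∨ (403 : Int) = y + 1) ∧
            (¬((403 : Int) = x) ∨ ¬((403 : Int) = y)) then 1 else 0 := by
  unfold sosedov
  norm_num

theorem rowg_none_x (x y : Int) (hx : x < 402) :
    (if sosedov x y [((403 : Int), (403 : Int))] = 1 then some (x, y) else none) = none := by
  rw [sos_w, if_neg (by omega)]

theorem rowg_none_y (x y : Int) (hy : y < 402) :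
    (if sosedov x y [((403 : Int), (403 : Int))] = 1 then some (x, y) else none) = none := by
  rw [sos_w, if_neg (by omega)]

theorem cellsR_witness :
    cellsR [((403 : Int), (403 : Int))] 405 405 1
      = [(402, 402), (402, 403), (402, 404), (403, 402), (403, 404), (404, 402), (404, 403), (404, 404)] := by
  unfold cellsR
  rw [PySem.List.pyRange_one_append 0 402 405 (by norm_num) (by norm_num), List.flatMap_append,
    List.flatMap_eq_nil_iff.mpr fun x hx =>
      List.filterMap_eq_nil_iff.mpr fun y _ =>
        rowg_none_x x y ((PySem.List.mem_pyRange_one).1 hx).2,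
    List.nil_append,
    show PySem.List.pyRange 402 405 1 = [402, 403, 404] from by decide]
  have hrow : ∀ x : Int,
      List.filterMap (fun y => if sosedov x y [((403 : Int), (403 : Int))] = 1 then some (x, y) else none)
          (PySem.List.pyRange 0 402 1 ++ [402, 403, 404])
        = List.filterMap (fun y => if sosedov x y [((403 : Int), (403 : Int))] = 1 then some (x, y) else none)
          [402, 403, 404] := by
    intro x
    rw [List.filterMap_append,
      List.filterMap_eq_nil_iff.mpr fun y hy =>
        rowg_none_y x y ((PySem.List.mem_pyRange_one).1 hy).2,
      List.nil_append]
  simp only [List.flatMap_cons, List.flatMap_nil, List.append_nil]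
  rw [hrow 402, hrow 403, hrow 404]
  decide

-- ===== VERDICT (by name: the statement is the Claim_ definition above) =====
theorem n_sosedov_spec : Claim_unchanged_n_sosedov := by
  intro mine s v n _ hnD
  rw [n_sosedov_eq, alt_eq]
  congr 1
  refine List.filter_eq_self.mpr fun c hc => ?_
  obtain ⟨h1, h2, h3, h4, h5⟩ := (mem_cellsR mine s v n c).1 hc
  by_cases hce : c = ((404 : Int), (404 : Int))
  · subst hce
    exact absurd ((D_iff mine s v n).mpr ⟨h2, h4, h5⟩) hnD
  · simp [hce]

theorem n_sosedov_changed : Claim_changed_n_sosedov := by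
  unfold Claim_changed_n_sosedov
  refine ⟨by decide, by decide, ?_, ?_, by decide⟩
  · show n_sosedov [((403 : Int), (403 : Int))] 405 405 1 = _
    rw [n_sosedov_eq, cellsR_witness]
    decide
  · show n_sosedov_alt [((403 : Int), (403 : Int))] 405 405 1 = _
    rw [alt_eq, cellsR_witness]
    decide

theorem n_sosedov_tight : Claim_exact_n_sosedov := by
  intro mine s v n _ hD heq
  obtain ⟨h1, h2, h3⟩ := (D_iff mine s v n).1 hD
  rw [n_sosedov_eq, alt_eq] at heq
  have h4 : ((404 : Int), (404 : Int)) ∈ PySem.Set.ofList (cellsR mine s v n) :=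
    (PySem.Set.mem_ofList _ _).mpr
      ((mem_cellsR mine s v n _).mpr ⟨by norm_num, h1, by norm_num, h2, h3⟩)
  rw [← heq] at h4
  have h5 := List.of_mem_filter ((PySem.Set.mem_ofList _ _).1 h4)
  simp at h5
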